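-- pv_equiv track=rewrite | github.com/roskakori/chatmaid | build_chatmaid.py | _indexOfLineWhereToInsertSanitize
-- ===== SOURCE A (Python) =====
-- def _indexOfLineWhereToInsertSanitize(lines):
--     result = None
--     isInOnChatMessage = False
--     for index, line in enumerate(lines):
--         if not isInOnChatMessage:
--             if line.startswith('function OnChatMessage'):
--                isInOnChatMessage = True
--         else:
--             if line.rstrip() == 'end':
--                 isInOnChatMessage = False
--             elif line.strip() == 'if (not args.author) then':
--                 result = index
--     assert result is not None, 'R5Chat.lua must contain OnChatMessage() with author query'
--     return result
-- ===== SOURCE B (Python) =====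
-- def _indexOfLineWhereToInsertSanitize(lines):
--     # Reverse scan: the last author-query line whose nearest preceding
--     # marker line (OnChatMessage start / 'end') is a start lies inside a block.
--     revPairs = list(enumerate(lines))
--     revPairs.reverse()
--     for k, (index, line) in enumerate(revPairs):
--         if line.strip() == 'if (not args.author) then':
--             for _, earlier in revPairs[k + 1:]:
--                 if earlier.startswith('function OnChatMessage'):
--                     return index
--                 if earlier.rstrip() == 'end':
--                     break
--     raise AssertionError('R5Chat.lua must contain OnChatMessage() with author query')
-- ===== Notes on version B (the rewrite author's own statement) =====
-- stated objective: alternative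
-- what changed: Replaces A's forward scan with a mutable in-block flag and last-match overwrite by a reverse scan over the enumerated lines that returns the first author-query line whose nearest preceding marker line (OnChatMessage header / 'end') is a header, i.e. that lies inside a block.
import Mathlib
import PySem

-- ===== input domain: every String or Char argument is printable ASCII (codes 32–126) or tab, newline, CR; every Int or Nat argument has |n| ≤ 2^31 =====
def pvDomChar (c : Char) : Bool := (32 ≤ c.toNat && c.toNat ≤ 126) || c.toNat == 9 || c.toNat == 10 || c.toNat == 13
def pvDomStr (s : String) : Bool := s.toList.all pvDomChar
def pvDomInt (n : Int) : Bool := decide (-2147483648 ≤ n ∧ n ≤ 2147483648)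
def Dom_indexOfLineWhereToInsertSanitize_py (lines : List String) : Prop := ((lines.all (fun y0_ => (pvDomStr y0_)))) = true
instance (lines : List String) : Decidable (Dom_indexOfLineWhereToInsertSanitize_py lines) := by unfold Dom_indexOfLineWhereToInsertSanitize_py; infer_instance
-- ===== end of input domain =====

-- B replaces A's forward flag-tracking scan by a reverse scan that classifies each
-- candidate line by its nearest preceding marker line (objective: alternative decomposition).
-- Both Pythons raise AssertionError when no author-query line lies in an OnChatMessage
-- block; those inputs are outside Pre_ and the ports return 0 there.

-- ===== PORT A =====
def pvStepA (st : Option Int × Bool) (p : Int × String) : Option Int × Bool :=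
  if st.2 = false then
    (if PySem.Str.startswith p.2 "function OnChatMessage" then (st.1, true) else st)
  else
    if PySem.Str.rstrip p.2 = "end" then (st.1, false)
    else if PySem.Str.strip p.2 = "if (not args.author) then" then (some p.1, true)
    else st

def indexOfLineWhereToInsertSanitize_py (lines : List String) : Int :=
  -- the assert: result = None (raise) is excluded by Pre_; the port returns 0 there
  (((PySem.List.enumerate lines).foldl pvStepA (none, false)).1).getD 0

-- ===== PORT B =====
-- inner loop of Source B: nearest marker among the earlier (reversed) pairs: start → in block
def pvBackFlag : List (Int × String) → Bool
  | [] => false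
  | p :: rest =>
    if PySem.Str.startswith p.2 "function OnChatMessage" then true
    else if PySem.Str.rstrip p.2 = "end" then false
    else pvBackFlag rest

-- outer loop of Source B over the reversed enumerated lines
def pvScanB : List (Int × String) → Option Int
  | [] => none
  | p :: rest =>
    if PySem.Str.strip p.2 = "if (not args.author) then" then
      (if pvBackFlag rest then some p.1 else pvScanB rest)
    else pvScanB rest

def indexOfLineWhereToInsertSanitize_py_alt (lines : List String) : Int :=
  (pvScanB ((PySem.List.enumerate lines).reverse)).getD 0

-- ===== PRECONDITION & SPEC =====
-- Pre_ excludes exactly the inputs where A's assert fails (AssertionError): no line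
-- stripping to the author query lies strictly inside an OnChatMessage block.
def Pre_indexOfLineWhereToInsertSanitize_py (lines : List String) : Prop :=
  ∃ i < lines.length, PySem.Str.strip (lines.getD i "") = "if (not args.author) then" ∧
    ∃ j < i, PySem.Str.startswith (lines.getD j "") "function OnChatMessage" = true ∧
      ∀ k < i, j < k → PySem.Str.rstrip (lines.getD k "") ≠ "end"
instance (lines : List String) : Decidable (Pre_indexOfLineWhereToInsertSanitize_py lines) := by
  unfold Pre_indexOfLineWhereToInsertSanitize_py; infer_instance

def pvWitness_indexOfLineWhereToInsertSanitize_py : List String :=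
  ["function OnChatMessage(args)", "  if (not args.author) then", "end"]

def Spec_indexOfLineWhereToInsertSanitize_py (lines : List String) (out : Int) : Prop := out = indexOfLineWhereToInsertSanitize_py_alt lines
instance (lines : List String) (out : Int) : Decidable (Spec_indexOfLineWhereToInsertSanitize_py lines out) := by unfold Spec_indexOfLineWhereToInsertSanitize_py; infer_instance

-- ===== CLAIM (what is proved, stated in full; the proofs are below) =====
def Claim_equal_indexOfLineWhereToInsertSanitize_py : Prop := ∀ (lines : List String), Dom_indexOfLineWhereToInsertSanitize_py lines → Pre_indexOfLineWhereToInsertSanitize_py lines → Spec_indexOfLineWhereToInsertSanitize_py lines (indexOfLineWhereToInsertSanitize_py lines)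

-- ===== LEMMAS AND PROOFS =====

-- rstrip only removes trailing characters: its result is a prefix of the input
theorem pv_rstrip_prefix (l : List Char) : PySem.Chars.rstrip l <+: l := by
  have h := List.dropWhile_suffix (l := l.reverse) (p := PySem.Chars.isspace)
  have := List.reverse_prefix.mpr (by simpa using h)
  simpa [PySem.Chars.rstrip] using this

-- a line starting with "function OnChatMessage" does not rstrip to "end"
theorem pv_start_not_end (s : String)
    (h : PySem.Str.startswith s "function OnChatMessage" = true) :
    PySem.Str.rstrip s ≠ "end" := by
  intro he
  have hp : ("function OnChatMessage".toList) <+: s.toList := by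
    rw [PySem.Str.startswith_eq, PySem.Chars.startswith_iff] at h
    exact h
  have he' : PySem.Chars.rstrip s.toList = "end".toList := by
    have := congrArg String.toList he
    rwa [PySem.Str.toList_rstrip] at this
  have hq : ("end".toList) <+: s.toList := he' ▸ pv_rstrip_prefix s.toList
  rcases hp with ⟨t1, h1⟩
  rcases hq with ⟨t2, h2⟩
  rw [← h1] at h2
  simp at h2

-- a line stripping to the author query does not rstrip to "end"
theorem pv_auth_not_end (s : String)
    (h : PySem.Str.strip s = "if (not args.author) then") :
    PySem.Str.rstrip s ≠ "end" := by
  intro he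
  have he' : PySem.Chars.rstrip s.toList = "end".toList := by
    have := congrArg String.toList he
    rwa [PySem.Str.toList_rstrip] at this
  have hq : ("end".toList) <+: s.toList := he' ▸ pv_rstrip_prefix s.toList
  rcases hq with ⟨t, ht⟩
  have hstrip : PySem.Chars.strip s.toList = PySem.Chars.rstrip s.toList := by
    rw [← ht]
    simp [PySem.Chars.strip, PySem.Chars.lstrip, PySem.Chars.isspace]
  have := congrArg String.toList h
  rw [PySem.Str.toList_strip, hstrip, he'] at this
  simp at this

-- one step of A's fold, fed the accumulated reverse-scan state, is one cons of B's scans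
theorem pv_step_cons (r : List (Int × String)) (p : Int × String) :
    pvStepA (pvScanB r, pvBackFlag r) p = (pvScanB (p :: r), pvBackFlag (p :: r)) := by
  cases hs : PySem.Str.startswith p.2 "function OnChatMessage" with
  | true =>
      have he : ¬ PySem.Str.rstrip p.2 = "end" := pv_start_not_end p.2 hs
      cases hf : pvBackFlag r with
      | false => simp only [pvStepA, pvScanB, pvBackFlag, hs, hf]; simp
      | true =>
          by_cases ha : PySem.Str.strip p.2 = "if (not args.author) then"
          · simp only [pvStepA, pvScanB, pvBackFlag, hs, hf]; simp [he, ha]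
          · simp only [pvStepA, pvScanB, pvBackFlag, hs, hf]; simp [he, ha]
  | false =>
      by_cases he : PySem.Str.rstrip p.2 = "end"
      · have hna : ¬ PySem.Str.strip p.2 = "if (not args.author) then" :=
          fun ha => pv_auth_not_end p.2 ha he
        cases hf : pvBackFlag r with
        | false => simp only [pvStepA, pvScanB, pvBackFlag, hs, hf]; simp [he]
        | true => simp only [pvStepA, pvScanB, pvBackFlag, hs, hf]; simp [he, hna]
      · by_cases ha : PySem.Str.strip p.2 = "if (not args.author) then"
        · cases hf : pvBackFlag r with
          | false => simp only [pvStepA, pvScanB, pvBackFlag, hs, hf]; simp [he, ha]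
          | true => simp only [pvStepA, pvScanB, pvBackFlag, hs, hf]; simp [he, ha]
        · cases hf : pvBackFlag r with
          | false => simp only [pvStepA, pvScanB, pvBackFlag, hs, hf]; simp [he, ha]
          | true => simp only [pvStepA, pvScanB, pvBackFlag, hs, hf]; simp [he, ha]

-- A's whole fold computes B's reverse scans of the same enumerated list
theorem pv_fold_eq (l : List String) :
    (PySem.List.enumerate l).foldl pvStepA (none, false) =
      (pvScanB ((PySem.List.enumerate l).reverse),
       pvBackFlag ((PySem.List.enumerate l).reverse)) := by
  induction l using List.reverseRecOn with
  | nil => simp [PySem.List.enumerate, pvScanB, pvBackFlag]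
  | append_singleton xs x ih =>
    rw [PySem.List.enumerate_append]
    rw [List.foldl_append, ih]
    simp [PySem.List.enumerate, pv_step_cons]

-- ===== VERDICT (by name: the statement is the Claim_ definition above) =====
theorem indexOfLineWhereToInsertSanitize_py_spec : Claim_equal_indexOfLineWhereToInsertSanitize_py := by
  intro lines _ _
  unfold Spec_indexOfLineWhereToInsertSanitize_py
  unfold indexOfLineWhereToInsertSanitize_py indexOfLineWhereToInsertSanitize_py_alt
  rw [pv_fold_eq]
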